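-- pv_equiv track=rewrite | github.com/ngeodesic-ai/ngf-alpha | dev/small-benchmarks-depr-v1/stage11-well-benchmark-v10e.py | _expected_shape_symbols
-- ===== SOURCE A (Python) =====
-- def _expected_shape_symbols(rows:int, cols:int):
--     """
--     Return the sequence of symbols (from { '[', ']', ',', 'd' }) that exactly
--     describes an r x c grid like [[[d,d,...],[...]], ... ].
--     """
--     seq = ['[', '[']
--     for r in range(rows):
--         seq.append('[')
--         for c in range(cols):
--             seq.append('d')
--             if c < cols-1: seq.append(',')
--         seq.append(']')
--         if r < rows-1: seq += [',', '[']
--     seq.append(']')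
--     return seq
-- ===== SOURCE B (Python) =====
-- def _expected_shape_symbols(rows: int, cols: int):
--     # Positional (closed-form) generation: compute the total token count and
--     # decide each token directly from its index by modular arithmetic, instead
--     # of building the sequence with nested append loops.
--     if rows <= 0:
--         return ['[', '[', ']']
--     blocklen = 2 * cols + 1 if cols > 0 else 2   # tokens in one row block
--     period = blocklen + 2                        # row block plus ',[' separator
--     total = rows * period + 1                    # '[[' + rows blocks + seps + ']'
--
--     def sym(i):
--         if i < 2:
--             return '['
--         if i == total - 1:
--             return ']'
--         o = (i - 2) % period
--         if o == 0:
--             return '['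
--         if o == blocklen - 1:
--             return ']'
--         if o == blocklen:
--             return ','
--         if o == blocklen + 1:
--             return '['
--         return 'd' if o % 2 == 1 else ','
--
--     return [sym(i) for i in range(total)]
-- ===== Notes on version B (the rewrite author's own statement) =====
-- stated objective: alternative
-- what changed: Replaces A's nested append loops with positional generation: compute the total token count in closed form and decide each token directly from its index by modular arithmetic (offset within a row-plus-separator period), no sequence is built incrementally.
import Mathlib
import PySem

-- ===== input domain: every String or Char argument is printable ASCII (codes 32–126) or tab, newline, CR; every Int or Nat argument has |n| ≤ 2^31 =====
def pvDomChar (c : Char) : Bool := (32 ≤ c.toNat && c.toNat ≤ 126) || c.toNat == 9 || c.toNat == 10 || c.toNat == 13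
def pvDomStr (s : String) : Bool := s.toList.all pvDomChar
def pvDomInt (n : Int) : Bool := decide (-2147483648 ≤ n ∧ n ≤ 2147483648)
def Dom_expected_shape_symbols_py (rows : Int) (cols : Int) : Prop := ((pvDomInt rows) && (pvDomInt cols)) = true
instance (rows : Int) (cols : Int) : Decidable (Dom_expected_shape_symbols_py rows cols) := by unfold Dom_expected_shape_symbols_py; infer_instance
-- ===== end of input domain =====

-- B generates each token directly from its index by modular arithmetic (closed-form
-- length, one map over the index range) instead of A's nested append loops; same cost.

-- ===== PORT A =====
def expected_shape_symbols_py (rows : Int) (cols : Int) : List String :=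
  let seq : List String := ["[", "["]
  let seq := (PySem.List.pyRange 0 rows 1).foldl (fun seq r =>
    let seq := seq ++ ["["]
    let seq := (PySem.List.pyRange 0 cols 1).foldl (fun seq c =>
      let seq := seq ++ ["d"]
      if c < cols - 1 then seq ++ [","] else seq) seq
    let seq := seq ++ ["]"]
    if r < rows - 1 then seq ++ [",", "["] else seq) seq
  seq ++ ["]"]

-- ===== PORT B =====
-- positional generation: list comprehension over range(total), each token decided
-- from its index; Python's % on nonnegative operands → PySem.Int.mod (exact).
def expected_shape_symbols_py_alt (rows : Int) (cols : Int) : List String :=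
  if rows ≤ 0 then ["[", "[", "]"]
  else
    let blocklen : Int := if cols > 0 then 2 * cols + 1 else 2
    let period : Int := blocklen + 2
    let total : Int := rows * period + 1
    (PySem.List.pyRange 0 total 1).map (fun i =>
      if i < 2 then "["
      else if i = total - 1 then "]"
      else
        let o := PySem.Int.mod (i - 2) period
        if o = 0 then "["
        else if o = blocklen - 1 then "]"
        else if o = blocklen then ","
        else if o = blocklen + 1 then "["
        else if PySem.Int.mod o 2 = 1 then "d" else ",")

-- ===== PRECONDITION & SPEC =====
def Spec_expected_shape_symbols_py (rows : Int) (cols : Int) (out : List String) : Prop := out = expected_shape_symbols_py_alt rows cols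
instance (rows : Int) (cols : Int) (out : List String) : Decidable (Spec_expected_shape_symbols_py rows cols out) := by unfold Spec_expected_shape_symbols_py; infer_instance

-- ===== CLAIM (what is proved, stated in full; the proofs are below) =====
def Claim_equal_expected_shape_symbols_py : Prop := ∀ (rows : Int) (cols : Int), Dom_expected_shape_symbols_py rows cols → Spec_expected_shape_symbols_py rows cols (expected_shape_symbols_py rows cols)

-- ===== LEMMAS AND PROOFS =====

-- one row block as a token list, and its length
def blockTok (C : Nat) : List String := ["["] ++ List.intercalate [","] (List.replicate C ["d"]) ++ ["]"]
def blockLen (C : Nat) : Nat := if C = 0 then 2 else 2 * C + 1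

-- the pattern of one period (row block + ',[' separator) as a function of the offset
def gpat (B o : Nat) : String :=
  if o = 0 then "[" else if o = B - 1 then "]" else if o = B then ","
  else if o = B + 1 then "[" else if o % 2 = 1 then "d" else ","

lemma blockLen_ge (C : Nat) : 2 ≤ blockLen C := by unfold blockLen; split <;> omega

-- intercalate of (n+1) copies = n copies of (x ++ sep), then a bare x
lemma intercalate_replicate_succ {α : Type} (n : Nat) (x sep : List α) :
    List.intercalate sep (List.replicate (n + 1) x)
      = (List.replicate n (x ++ sep)).flatten ++ x := by
  induction n with
  | zero => simp [List.intercalate]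
  | succ m ih =>
      have step : ∀ (y : List α) (l : List (List α)),
          List.intercalate sep (x :: y :: l) = x ++ sep ++ List.intercalate sep (y :: l) := by
        intro y l; simp [List.intercalate]
      calc List.intercalate sep (List.replicate (m + 1 + 1) x)
          = x ++ sep ++ List.intercalate sep (List.replicate (m + 1) x) := step x (List.replicate m x)
        _ = x ++ sep ++ ((List.replicate m (x ++ sep)).flatten ++ x) := by rw [ih]
        _ = (List.replicate (m + 1) (x ++ sep)).flatten ++ x := by
              simp [List.replicate_succ, List.append_assoc]

-- the alternating 'd'/',' interior of a nonempty row
lemma inner_alt (c : Nat) :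
    (List.range (2 * c + 1)).map (fun j => if j % 2 = 0 then "d" else ",")
      = List.intercalate [","] (List.replicate (c + 1) ["d"]) := by
  induction c with
  | zero => simp [List.intercalate]
  | succ k ih =>
      have h1 : 2 * (k + 1) + 1 = (2 * k + 1) + 1 + 1 := by omega
      rw [h1, List.range_succ, List.range_succ, List.map_append, List.map_append, ih]
      rw [intercalate_replicate_succ, intercalate_replicate_succ]
      have h2 : (2 * k + 1) % 2 = 1 := by omega
      have h3 : (2 * k + 1 + 1) % 2 = 0 := by omega
      simp [h2, h3, List.replicate_succ' (n := k), List.append_assoc]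

-- the first blockLen offsets of the pattern spell out one row block
lemma block_map (C : Nat) :
    (List.range (blockLen C)).map (gpat (blockLen C)) = blockTok C := by
  cases C with
  | zero =>
      simp [blockLen, blockTok, gpat, List.range_succ, List.intercalate]
  | succ k =>
      have hB : blockLen (k + 1) = 2 * k + 1 + 1 + 1 := by unfold blockLen; split <;> omega
      rw [hB, List.range_succ_eq_map, List.range_succ, List.map_cons, List.map_append]
      have h0 : gpat (2 * k + 1 + 1 + 1) 0 = "[" := by simp [gpat]
      have hlast : gpat (2 * k + 1 + 1 + 1) (Nat.succ (2 * k + 1)) = "]" := by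
        unfold gpat; rw [if_neg (by omega), if_pos (by omega)]
      have hmid : (List.range (2 * k + 1)).map (gpat (2 * k + 1 + 1 + 1) ∘ Nat.succ)
          = (List.range (2 * k + 1)).map (fun j => if j % 2 = 0 then "d" else ",") := by
        apply List.map_congr_left
        intro j hj
        have hj' : j < 2 * k + 1 := List.mem_range.mp hj
        unfold Function.comp gpat
        rw [if_neg (by omega), if_neg (by omega), if_neg (by omega), if_neg (by omega)]
        by_cases h : j % 2 = 0
        · rw [if_pos (by omega), if_pos h]
        · rw [if_neg (by omega), if_neg h]
      rw [List.map_append, List.map_map, List.map_map, hmid, inner_alt, h0]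
      simp only [List.map_singleton, Function.comp_apply, Nat.succ_eq_add_one] at hlast ⊢
      rw [hlast]
      simp [blockTok]
  
-- one full period spells out one row block followed by the ',[' separator
lemma period_map (C : Nat) :
    (List.range (blockLen C + 2)).map (gpat (blockLen C)) = blockTok C ++ [",", "["] := by
  have hB := blockLen_ge C
  rw [show blockLen C + 2 = (blockLen C + 1) + 1 by rfl, List.range_succ, List.range_succ,
      List.map_append, List.map_append, block_map]
  have h1 : gpat (blockLen C) (blockLen C) = "," := by
    unfold gpat; rw [if_neg (by omega), if_neg (by omega), if_pos rfl]
  have h2 : gpat (blockLen C) (blockLen C + 1) = "[" := by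
    unfold gpat; rw [if_neg (by omega), if_neg (by omega), if_neg (by omega), if_pos rfl]
  simp [h1, h2]

-- mapping a P-periodic index function over range (k*P) = k copies of one period
lemma periodic_map (P : Nat) (f : Nat → String) (k : Nat) :
    (List.range (k * P)).map (fun i => f (i % P))
      = (List.replicate k ((List.range P).map f)).flatten := by
  induction k with
  | zero => simp
  | succ m ih =>
      have h1 : (m + 1) * P = m * P + P := by ring
      rw [h1, List.range_add, List.map_append, List.map_map, ih]
      have h2 : (List.range P).map ((fun i => f (i % P)) ∘ (fun i => m * P + i))
          = (List.range P).map f := by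
        apply List.map_congr_left
        intro i hi
        have hi' : i < P := List.mem_range.mp hi
        have hmod : (m * P + i) % P = i := by
          rw [Nat.add_comm, Nat.add_mul_mod_self_right, Nat.mod_eq_of_lt hi']
        simp [Function.comp, hmod]
      rw [h2, List.replicate_succ' (n := m), List.flatten_append]
      simp
  
-- A's nested foldl rewritten to the intercalate normal form
-- the "separator after every element except the last" pattern IS intercalate
lemma flatMap_range_sep {α : Type} (n : Nat) (x sep : List α) :
    (List.range n).flatMap (fun (i : Nat) => x ++ if (i : Int) < (n : Int) - 1 then sep else [])
      = List.intercalate sep (List.replicate n x) := by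
  cases n with
  | zero => simp [List.intercalate]
  | succ m =>
      rw [List.range_succ, List.flatMap_append, intercalate_replicate_succ]
      have h1 : (List.range m).flatMap
          (fun (i : Nat) => x ++ if (i : Int) < ((m + 1 : Nat) : Int) - 1 then sep else [])
          = (List.replicate m (x ++ sep)).flatten := by
        rw [List.flatMap_def, List.map_congr_left (g := fun _ => x ++ sep) (fun i hi => by
          have hi' : (i : Int) < ((m + 1 : Nat) : Int) - 1 := by
            have := List.mem_range.mp hi; push_cast; omega
          rw [if_pos hi'])]
        rw [List.map_const', List.length_range]
      have h2 : ¬ ((m : Int) < ((m + 1 : Nat) : Int) - 1) := by push_cast; omega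
      rw [h1]
      simp only [List.flatMap_cons, List.flatMap_nil, if_neg h2]
      simp

-- same statement over pyRange with an Int bound (a nonpositive bound gives the empty range)
lemma flatMap_pyRange_sep {α : Type} (b : Int) (x sep : List α) :
    (PySem.List.pyRange 0 b 1).flatMap (fun i => x ++ if i < b - 1 then sep else [])
      = List.intercalate sep (List.replicate b.toNat x) := by
  rcases le_or_gt b 0 with hb | hb
  · rw [PySem.List.pyRange_one_eq_nil (by omega)]
    simp [Int.toNat_of_nonpos hb, List.intercalate]
  · have hbn : b = (b.toNat : Int) := (Int.toNat_of_nonneg (by omega)).symm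
    rw [PySem.List.pyRange_one, List.flatMap_map]
    simp only [Int.sub_zero, Int.zero_add]
    rw [hbn]
    simp only [Int.toNat_natCast]
    exact flatMap_range_sep b.toNat x sep

-- A's nested foldl rewritten to the intercalate normal form
lemma portA_eq (rows cols : Int) :
    expected_shape_symbols_py rows cols
      = ["[", "["]
        ++ List.intercalate [",", "["] (List.replicate rows.toNat (blockTok cols.toNat))
        ++ ["]"] := by
  unfold expected_shape_symbols_py
  have hinner : ∀ (seq : List String),
      (PySem.List.pyRange 0 cols 1).foldl (fun seq c =>
        let seq := seq ++ ["d"]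
        if c < cols - 1 then seq ++ [","] else seq) seq
      = seq ++ List.intercalate [","] (List.replicate cols.toNat ["d"]) := by
    intro seq
    have hcg : (PySem.List.pyRange 0 cols 1).foldl (fun seq c =>
        let seq := seq ++ ["d"]
        if c < cols - 1 then seq ++ [","] else seq) seq
      = (PySem.List.pyRange 0 cols 1).foldl (fun seq c =>
        seq ++ (["d"] ++ if c < cols - 1 then [","] else [])) seq := by
      apply PySem.List.foldl_congr_mem
      intro acc c _
      by_cases h : c < cols - 1 <;> simp [h]
    rw [hcg, PySem.List.foldl_append_eq_flatMap, flatMap_pyRange_sep]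
  have houter : (PySem.List.pyRange 0 rows 1).foldl (fun seq r =>
      let seq := seq ++ ["["]
      let seq := (PySem.List.pyRange 0 cols 1).foldl (fun seq c =>
        let seq := seq ++ ["d"]
        if c < cols - 1 then seq ++ [","] else seq) seq
      let seq := seq ++ ["]"]
      if r < rows - 1 then seq ++ [",", "["] else seq) (["[", "["] : List String)
    = ["[", "["] ++ (PySem.List.pyRange 0 rows 1).flatMap (fun r =>
        (["["] ++ List.intercalate [","] (List.replicate cols.toNat ["d"]) ++ ["]"])
        ++ if r < rows - 1 then [",", "["] else []) := by
    rw [← PySem.List.foldl_append_eq_flatMap]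
    apply PySem.List.foldl_congr_mem
    intro acc r _
    simp only [hinner]
    by_cases h : r < rows - 1 <;> simp [h, List.append_assoc]
  simp only [houter, flatMap_pyRange_sep]
  rfl

-- B's index-to-token function, restated over Nat indices
def symN (R Bn k : Nat) : String :=
  if k < 2 then "[" else if k = R * (Bn + 2) then "]" else gpat Bn ((k - 2) % (Bn + 2))

-- mapping symN over all indices spells out the whole token sequence
lemma symN_map (C R' : Nat) :
    (List.range ((R' + 1) * (blockLen C + 2) + 1)).map (symN (R' + 1) (blockLen C))
      = ["[", "["]
        ++ List.intercalate [",", "["] (List.replicate (R' + 1) (blockTok C))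
        ++ ["]"] := by
  have hB := blockLen_ge C
  set Bn := blockLen C with hBn
  rw [List.range_succ, List.map_append]
  have hlast : [(R' + 1) * (Bn + 2)].map (symN (R' + 1) Bn) = ["]"] := by
    unfold symN
    rw [List.map_singleton, if_neg (by nlinarith), if_pos rfl]
  have hRP : (R' + 1) * (Bn + 2) = 2 + (R' * (Bn + 2) + Bn) := by
    rw [add_mul, one_mul]; omega
  rw [hlast, hRP, List.range_add, List.map_append, List.map_map]
  have h2 : (List.range 2).map (symN (R' + 1) Bn) = ["[", "["] := by
    simp [List.range_succ, symN]
  have hmid : (List.range (R' * (Bn + 2) + Bn)).map (symN (R' + 1) Bn ∘ (fun i => 2 + i))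
      = (List.range (R' * (Bn + 2) + Bn)).map (fun j => gpat Bn (j % (Bn + 2))) := by
    apply List.map_congr_left
    intro j hj
    have hj' : j < R' * (Bn + 2) + Bn := List.mem_range.mp hj
    show symN (R' + 1) Bn (2 + j) = gpat Bn (j % (Bn + 2))
    unfold symN
    rw [if_neg (by omega), if_neg (by omega)]
    have hj2 : 2 + j - 2 = j := by omega
    rw [hj2]
  rw [hmid, List.range_add, List.map_append, List.map_map]
  have htail : (List.range Bn).map ((fun j => gpat Bn (j % (Bn + 2))) ∘ (fun i => R' * (Bn + 2) + i))
      = blockTok C := by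
    rw [← block_map C, ← hBn]
    apply List.map_congr_left
    intro i hi
    have hi' : i < Bn := List.mem_range.mp hi
    have hmod : (R' * (Bn + 2) + i) % (Bn + 2) = i := by
      rw [Nat.add_comm, Nat.add_mul_mod_self_right, Nat.mod_eq_of_lt (by omega)]
    simp [Function.comp, hmod]
  rw [htail, periodic_map (Bn + 2) (gpat Bn) R']
  rw [show (List.range (Bn + 2)).map (gpat Bn) = blockTok C ++ [",", "["] from period_map C]
  rw [intercalate_replicate_succ, h2]

-- B's positional map rewritten to the same normal form (rows > 0)
lemma portB_eq (rows cols : Int) (hr : 0 < rows) :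
    expected_shape_symbols_py_alt rows cols
      = ["[", "["]
        ++ List.intercalate [",", "["] (List.replicate rows.toNat (blockTok cols.toNat))
        ++ ["]"] := by
  have hB := blockLen_ge cols.toNat
  set C := cols.toNat with hC
  set Bn := blockLen C with hBn
  set R := rows.toNat with hR
  have hrows : rows = ((R : Nat) : Int) := (Int.toNat_of_nonneg (by omega)).symm
  have hR1 : 1 ≤ R := by omega
  clear_value R
  unfold expected_shape_symbols_py_alt
  rw [if_neg (by omega)]
  have hbl : (if cols > 0 then 2 * cols + 1 else 2) = ((Bn : Nat) : Int) := by
    rw [hBn, hC]; unfold blockLen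
    by_cases h : cols > 0
    · rw [if_pos h, if_neg (by omega)]
      push_cast [Int.toNat_of_nonneg (by omega : (0:Int) ≤ cols)]
      ring
    · rw [if_neg h, if_pos (by omega)]
      rfl
  simp only [hbl]
  have htot : rows * (((Bn : Nat) : Int) + 2) + 1 = (((R * (Bn + 2) + 1 : Nat)) : Int) := by
    rw [hrows]; push_cast; ring
  simp only [htot]
  rw [PySem.List.pyRange_one, List.map_map]
  simp only [Int.sub_zero, Int.toNat_natCast]
  have hcong : ∀ k ∈ List.range (R * (Bn + 2) + 1),
      ((fun i : Int =>
          if i < 2 then "["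
          else if i = (((R * (Bn + 2) + 1 : Nat)) : Int) - 1 then "]"
          else
            let o := PySem.Int.mod (i - 2) (((Bn : Nat) : Int) + 2)
            if o = 0 then "["
            else if o = ((Bn : Nat) : Int) - 1 then "]"
            else if o = ((Bn : Nat) : Int) then ","
            else if o = ((Bn : Nat) : Int) + 1 then "["
            else if PySem.Int.mod o 2 = 1 then "d" else ",") ∘ (fun k : Nat => (0 : Int) + ↑k)) k
        = symN R Bn k := by
    intro k hk
    have hk' : k < R * (Bn + 2) + 1 := List.mem_range.mp hk
    simp only [Function.comp, Int.zero_add]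
    unfold symN
    by_cases h1 : k < 2
    · rw [if_pos (by exact_mod_cast h1), if_pos h1]
    · rw [if_neg (by exact_mod_cast h1), if_neg h1]
      by_cases h2 : k = R * (Bn + 2)
      · rw [if_pos (by rw [h2]; push_cast; ring), if_pos h2]
      · rw [if_neg (by
            intro hEq
            apply h2
            have hk2 : (k : Int) = ((R * (Bn + 2) : Nat) : Int) := by
              push_cast at hEq ⊢; linarith
            exact_mod_cast hk2), if_neg h2]
        have hmod : PySem.Int.mod ((k : Int) - 2) (((Bn : Nat) : Int) + 2)
            = (((k - 2) % (Bn + 2) : Nat) : Int) := by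
          rw [show ((k : Int) - 2) = (((k - 2 : Nat)) : Int) by omega,
              show (((Bn : Nat) : Int) + 2) = (((Bn + 2 : Nat)) : Int) by push_cast; ring]
          exact PySem.Int.mod_natCast _ _
        simp only [hmod]
        set o : Nat := (k - 2) % (Bn + 2) with ho
        unfold gpat
        by_cases g0 : o = 0
        · rw [if_pos (by exact_mod_cast g0), if_pos g0]
        · rw [if_neg (by exact_mod_cast g0), if_neg g0]
          by_cases g1 : o = Bn - 1
          · rw [if_pos (by omega), if_pos g1]
          · rw [if_neg (by omega), if_neg g1]
            by_cases g2 : o = Bn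
            · rw [if_pos (by exact_mod_cast g2), if_pos g2]
            · rw [if_neg (by exact_mod_cast g2), if_neg g2]
              by_cases g3 : o = Bn + 1
              · rw [if_pos (by omega), if_pos g3]
              · rw [if_neg (by omega), if_neg g3]
                have hmod2 : PySem.Int.mod ((o : Nat) : Int) 2 = ((o % 2 : Nat) : Int) := by
                  exact_mod_cast PySem.Int.mod_natCast o 2
                by_cases g4 : o % 2 = 1
                · rw [if_pos (by rw [hmod2]; exact_mod_cast g4), if_pos g4]
                · rw [if_neg (by rw [hmod2]; exact_mod_cast g4), if_neg g4]
  rw [List.map_congr_left hcong]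
  obtain ⟨R', hR'⟩ : ∃ R', R = R' + 1 := ⟨R - 1, by omega⟩
  rw [hR']
  exact symN_map C R'

-- ===== VERDICT (by name: the statement is the Claim_ definition above) =====
theorem expected_shape_symbols_py_spec : Claim_equal_expected_shape_symbols_py := by
  intro rows cols _
  unfold Spec_expected_shape_symbols_py
  rcases le_or_gt rows 0 with hr | hr
  · unfold expected_shape_symbols_py expected_shape_symbols_py_alt
    rw [show PySem.List.pyRange 0 rows 1 = [] from PySem.List.pyRange_one_eq_nil (by omega),
        if_pos hr]
    rfl
  · rw [portA_eq, portB_eq rows cols hr]
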